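-- pv_equiv track=rewrite | github.com/Jerrod3/BeaverHacks2021 | functions.py | get_modified_list
-- ===== SOURCE A (Python) =====
-- def get_modified_list(yearly_footprint, modified_footprint, age):
--     """creates a list of the modified cumulative footprint"""
--     # modification_factor = yearly_footprint = modified_footprint
--     modified_list = [yearly_footprint]
--
--     for i in range(1, 73):
--         if i <= age - 18:
--             modified_list.append(modified_list[i-1] + yearly_footprint)
--         else:
--             modified_list.append(modified_list[i-1] + modified_footprint)
--
--     return modified_list
-- ===== SOURCE B (Python) =====
-- def get_modified_list(yearly_footprint, modified_footprint, age):
--     """creates a list of the modified cumulative footprint"""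
--     k = max(0, min(72, age - 18))
--     return [yearly_footprint * (min(i, k) + 1)
--             + modified_footprint * (i - min(i, k))
--             for i in range(73)]
-- ===== Notes on version B (the rewrite author's own statement) =====
-- stated objective: alternative
-- what changed: B replaces A's running-sum loop by a closed form: each entry i is computed directly as yearly_footprint*(min(i,k)+1) + modified_footprint*(i-min(i,k)) with k the clamped number of yearly years, so no accumulation or previous entry is used.
import Mathlib
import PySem

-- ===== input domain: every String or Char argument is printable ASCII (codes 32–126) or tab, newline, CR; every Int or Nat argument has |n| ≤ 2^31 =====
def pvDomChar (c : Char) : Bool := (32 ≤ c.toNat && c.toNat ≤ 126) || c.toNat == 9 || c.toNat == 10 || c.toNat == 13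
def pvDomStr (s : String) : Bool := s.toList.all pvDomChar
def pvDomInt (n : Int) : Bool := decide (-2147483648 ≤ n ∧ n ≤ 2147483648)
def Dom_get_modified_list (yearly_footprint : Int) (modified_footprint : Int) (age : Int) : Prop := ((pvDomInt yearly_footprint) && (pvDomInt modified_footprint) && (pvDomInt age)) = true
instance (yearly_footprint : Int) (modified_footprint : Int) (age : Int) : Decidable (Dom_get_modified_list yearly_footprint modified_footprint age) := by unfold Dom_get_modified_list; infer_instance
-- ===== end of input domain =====

-- B computes each entry by a closed form (no accumulation) instead of A's running-sum loop; same values (objective: alternative).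


-- ===== PORT A =====
-- A: single loop appending modified_list[i-1] + delta inside the conditional, transliterated.
def get_modified_list (yearly_footprint : Int) (modified_footprint : Int) (age : Int) : List Int :=
  (PySem.List.pyRange 1 73 1).foldl
    (fun modified_list i =>
      if i ≤ age - 18 then
        modified_list ++ [(PySem.List.pyGet? modified_list (i - 1)).getD 0 + yearly_footprint]
      else
        modified_list ++ [(PySem.List.pyGet? modified_list (i - 1)).getD 0 + modified_footprint])
    [yearly_footprint]

-- ===== PORT B =====
-- B: closed form per index i: y*(min(i,k)+1) + m*(i-min(i,k)) with k = max(0, min(72, age-18)).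
def get_modified_list_alt (yearly_footprint : Int) (modified_footprint : Int) (age : Int) : List Int :=
  let k : Int := max 0 (min 72 (age - 18))
  (PySem.List.pyRange 0 73 1).map
    (fun i => yearly_footprint * (min i k + 1) + modified_footprint * (i - min i k))

-- ===== PRECONDITION & SPEC =====
def Spec_get_modified_list (yearly_footprint : Int) (modified_footprint : Int) (age : Int) (out : List Int) : Prop := out = get_modified_list_alt yearly_footprint modified_footprint age
instance (yearly_footprint : Int) (modified_footprint : Int) (age : Int) (out : List Int) : Decidable (Spec_get_modified_list yearly_footprint modified_footprint age out) := by unfold Spec_get_modified_list; infer_instance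

-- ===== CLAIM =====
def Claim_equal_get_modified_list : Prop := ∀ (yearly_footprint : Int) (modified_footprint : Int) (age : Int), Dom_get_modified_list yearly_footprint modified_footprint age → Spec_get_modified_list yearly_footprint modified_footprint age (get_modified_list yearly_footprint modified_footprint age)

-- ===== LEMMAS AND PROOFS =====

-- Proof-only helpers: the A-loop produces prefix sums; pvAccumAux names them.
def pvAccumAux (tot : Int) : List Int → List Int
  | [] => []
  | d :: ds => (tot + d) :: pvAccumAux (tot + d) ds

-- The A-loop with position-dependent delta d, generalized over the remaining range.
theorem pv_loop_eq (d : Int → Int) :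
    ∀ (n : Nat) (acc : List Int) (t : Int), acc.length + n = 73 → acc.getLast? = some t →
      (PySem.List.pyRange (acc.length : Int) 73 1).foldl
        (fun a i => a ++ [(PySem.List.pyGet? a (i - 1)).getD 0 + d i]) acc
      = acc ++ pvAccumAux t (((PySem.List.pyRange (acc.length : Int) 73 1)).map d) := by
  intro n
  induction n with
  | zero =>
    intro acc t hlen _
    have : (acc.length : Int) = 73 := by omega
    rw [this]
    simp [PySem.List.pyRange, pvAccumAux]
  | succ n ih =>
    intro acc t hlen hlast
    have hne : acc ≠ [] := by
      intro h; subst h; simp at hlast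
    have hlt : (acc.length : Int) < 73 := by omega
    rw [PySem.List.pyRange_one_cons (by omega)]
    have hget : (PySem.List.pyGet? acc ((acc.length : Int) - 1)).getD 0 = t := by
      rcases acc.eq_nil_or_concat' with h | ⟨ys, y, rfl⟩
      · exact absurd h hne
      · have : ((ys ++ [y]).length : Int) - 1 = (ys.length : Int) := by simp
        rw [this]
        have := PySem.List.pyGet?_eq_some_getElem (xs := ys ++ [y]) (i := (ys.length : Int))
          (by omega) (by simp)
        rw [this]
        simp at hlast ⊢
        omega
    simp only [List.foldl_cons, List.map_cons, hget, pvAccumAux]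
    have hlen' : (acc ++ [t + d (acc.length : Int)]).length + n = 73 := by simp; omega
    have := ih (acc ++ [t + d (acc.length : Int)]) (t + d (acc.length : Int)) hlen' (by simp)
    have hcast : ((acc ++ [t + d (acc.length : Int)]).length : Int) = (acc.length : Int) + 1 := by
      simp
    rw [hcast] at this
    rw [this, List.append_assoc]
    rfl

-- The prefix sums of the deltas are exactly the closed form.
theorem pv_accum_closed (y m age : Int) :
    ∀ (n c : Nat), c + n = 73 → 1 ≤ c →
      (PySem.List.pyRange 0 (c : Int) 1).map
          (fun i => y * (min i (max 0 (min 72 (age - 18))) + 1)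
            + m * (i - min i (max 0 (min 72 (age - 18)))))
        ++ pvAccumAux
            (y * (min ((c : Int) - 1) (max 0 (min 72 (age - 18))) + 1)
              + m * (((c : Int) - 1) - min ((c : Int) - 1) (max 0 (min 72 (age - 18)))))
            ((PySem.List.pyRange (c : Int) 73 1).map (fun i => if i ≤ age - 18 then y else m))
      = (PySem.List.pyRange 0 73 1).map
          (fun i => y * (min i (max 0 (min 72 (age - 18))) + 1)
            + m * (i - min i (max 0 (min 72 (age - 18))))) := by
  intro n
  induction n with
  | zero =>
    intro c hlen _
    have : (c : Int) = 73 := by omega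
    rw [this]
    simp [PySem.List.pyRange, pvAccumAux]
  | succ n ih =>
    intro c hlen hc
    have hlt : (c : Int) < 73 := by omega
    rw [PySem.List.pyRange_one_cons hlt]
    simp only [List.map_cons, pvAccumAux]
    have hstep :
        (y * (min ((c : Int) - 1) (max 0 (min 72 (age - 18))) + 1)
          + m * (((c : Int) - 1) - min ((c : Int) - 1) (max 0 (min 72 (age - 18)))))
          + (if (c : Int) ≤ age - 18 then y else m)
        = y * (min (c : Int) (max 0 (min 72 (age - 18))) + 1)
          + m * ((c : Int) - min (c : Int) (max 0 (min 72 (age - 18)))) := by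
      split_ifs with h
      · have h1 : min ((c : Int) - 1) (max 0 (min 72 (age - 18))) = (c : Int) - 1 := by omega
        have h2 : min (c : Int) (max 0 (min 72 (age - 18))) = (c : Int) := by omega
        rw [h1, h2]; ring
      · have h1 : min ((c : Int) - 1) (max 0 (min 72 (age - 18)))
            = max 0 (min 72 (age - 18)) := by omega
        have h2 : min (c : Int) (max 0 (min 72 (age - 18)))
            = max 0 (min 72 (age - 18)) := by omega
        rw [h1, h2]; ring
    rw [hstep]
    have hsplit : PySem.List.pyRange 0 ((c : Int) + 1) 1
        = PySem.List.pyRange 0 (c : Int) 1 ++ [(c : Int)] := by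
      exact PySem.List.pyRange_one_succ_right (by omega)
    have := ih (c + 1) (by omega) (by omega)
    have hc1 : ((c + 1 : Nat) : Int) = (c : Int) + 1 := by push_cast; ring
    rw [hc1, hsplit] at this
    have hc2 : (c : Int) + 1 - 1 = (c : Int) := by ring
    rw [hc2] at this
    simp only [List.map_append, List.map_cons, List.map_nil, List.append_assoc,
      List.cons_append, List.nil_append] at this ⊢
    exact this

-- ===== VERDICT =====
theorem get_modified_list_spec : Claim_equal_get_modified_list := by
  intro y m age _
  unfold Spec_get_modified_list get_modified_list get_modified_list_alt
  have hstep : (fun (a : List Int) (i : Int) =>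
      if i ≤ age - 18 then a ++ [(PySem.List.pyGet? a (i - 1)).getD 0 + y]
      else a ++ [(PySem.List.pyGet? a (i - 1)).getD 0 + m])
    = fun a i => a ++ [(PySem.List.pyGet? a (i - 1)).getD 0 +
        (if i ≤ age - 18 then y else m)] := by
    funext a i; split <;> rfl
  rw [hstep]
  have hA := pv_loop_eq (fun i => if i ≤ age - 18 then y else m) 72 [y] y (by simp) (by simp)
  simp only [List.length_cons, List.length_nil, Nat.cast_one, zero_add] at hA
  rw [hA]
  have hB := pv_accum_closed y m age 72 1 (by omega) (by omega)
  push_cast at hB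
  have h0 : min (0 : Int) (max 0 (min 72 (age - 18))) = 0 := by omega
  have hr1 : PySem.List.pyRange 0 1 1 = [(0 : Int)] := by
    have := PySem.List.pyRange_one_singleton (a := (0 : Int))
    simpa using this
  rw [hr1] at hB
  simp only [List.map_cons, List.map_nil, h0] at hB
  norm_num at hB
  simpa using hB
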